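-- pv_equiv track=rewrite | github.com/Anatel-Phys/GrassmannLibrary | IdentifyRecurrence.py | compare_terms_no_sign
-- ===== SOURCE A (Python) =====
-- import collections
--
-- def lists_are_equal(l1, l2):
--     return collections.Counter(l1) == collections.Counter(l2)
--
-- def compare_terms_no_sign(t1, t2):
--     terms1 = t1.copy()
--     terms2 = t2.copy()
--     terms_in_common = []
--
--     termsFound = True
--     #min_i = 0 wip to optimize func
--
--     while termsFound:
--         termsFound = False
--         for i in range(len(terms1)):
--             for j in range(len(terms2)):
--                 if lists_are_equal(terms1[i][1:], terms2[j][1:]):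
--                     #min_i = i
--                     cur_term1 = terms1[i]
--                     cur_term2 = terms2[j]
--                     termsFound = True
--                     break
--             if termsFound:
--                 break
--
--         if termsFound:
--             terms_in_common.append(cur_term1)
--             terms1.remove(cur_term1)
--             terms2.remove(cur_term2)
--
--     return terms_in_common, terms1, terms2
-- ===== SOURCE B (Python) =====
-- def compare_terms_no_sign(t1, t2):
--     # one forward pass; keys (sorted tails) of t2 precomputed once
--     rest = [(sorted(u[1:]), u) for u in t2]
--     common, left1 = [], []
--     for term in t1:
--         key = sorted(term[1:])
--         for idx in range(len(rest)):
--             if rest[idx][0] == key: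
--                 common.append(term)
--                 del rest[idx]
--                 break
--         else:
--             left1.append(term)
--     return common, left1, [u for _, u in rest]
-- ===== Notes on version B (the rewrite author's own statement) =====
-- stated objective: faster
-- what changed: Replaces A's restart-the-whole-scan-after-every-removal fixpoint loop (with Counter comparison recomputed for every (i,j) pair and removal by value) by a single forward pass over t1 that consumes the first remaining t2 entry with an equal precomputed sorted-tail key, deleting it by index.
import Mathlib
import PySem

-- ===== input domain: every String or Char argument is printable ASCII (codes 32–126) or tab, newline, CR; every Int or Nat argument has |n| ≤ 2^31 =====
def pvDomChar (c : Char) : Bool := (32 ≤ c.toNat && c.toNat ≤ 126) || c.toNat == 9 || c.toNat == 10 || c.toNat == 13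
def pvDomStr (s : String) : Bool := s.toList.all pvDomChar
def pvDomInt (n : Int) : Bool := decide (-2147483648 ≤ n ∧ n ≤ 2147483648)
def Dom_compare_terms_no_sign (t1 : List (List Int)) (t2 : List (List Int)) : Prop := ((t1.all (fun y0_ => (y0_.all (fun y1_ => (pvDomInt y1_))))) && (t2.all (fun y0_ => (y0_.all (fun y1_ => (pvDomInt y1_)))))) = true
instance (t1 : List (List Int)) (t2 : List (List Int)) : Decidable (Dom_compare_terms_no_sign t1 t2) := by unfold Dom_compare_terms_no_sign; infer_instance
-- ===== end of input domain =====

-- ===== PORT A =====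
-- B replaces A's restart-after-every-removal fixpoint scan with one forward pass over t1
-- consuming t2 entries by precomputed sorted-tail key (equal return values; faster).

-- lists_are_equal(l1, l2) = (Counter(l1) == Counter(l2)); dict == ignores order:
-- equal key sets and equal values on the keys.
def lists_are_equal (l1 l2 : List Int) : Bool :=
  PySem.Set.equal (PySem.Dict.counter l1).keys (PySem.Dict.counter l2).keys &&
  (PySem.Dict.counter l1).keys.all
    (fun k => (PySem.Dict.counter l1).getD k 0 == (PySem.Dict.counter l2).getD k 0)

-- inner 'for j in range(len(terms2)) … break': first terms2 element whose tail matches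
def pvFindT2 (t : List Int) : List (List Int) → Option (List Int)
  | [] => none
  | u :: rest =>
    if lists_are_equal (PySem.List.slice t (some 1) none) (PySem.List.slice u (some 1) none)
    then some u else pvFindT2 t rest

-- outer 'for i in range(len(terms1)) … break': first pair (cur_term1, cur_term2)
def pvFindPair : List (List Int) → List (List Int) → Option (List Int × List Int)
  | [], _ => none
  | t :: ts, terms2 =>
    match pvFindT2 t terms2 with
    | some u => some (t, u)
    | none => pvFindPair ts terms2

-- termination measure for the while loop (cited by the port's decreasing_by)
theorem pvRemove_length {xs : List (List Int)} {v : List Int} {r : List (List Int)}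
    (h : PySem.List.remove? xs v = some r) : r.length < xs.length := by
  have hv : v ∈ xs := by
    by_contra hn
    rw [(PySem.List.remove?_eq_none_iff xs v).mpr hn] at h
    simp at h
  rw [PySem.List.remove?_eq_some_erase xs v hv] at h
  injection h with h2
  subst h2
  have h3 := List.length_erase_of_mem hv
  have h4 := List.length_pos_of_mem hv
  omega

-- 'while termsFound:' — each pass scans from scratch, appends the match and removes
-- cur_term1 / cur_term2 by value (list.remove); the fallthrough arms are unreachable
-- (remove? of a found member never fails) and only make the recursion total.
def pvLoopA (terms1 terms2 common : List (List Int)) :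
    List (List Int) × List (List Int) × List (List Int) :=
  match pvFindPair terms1 terms2 with
  | none => (common, terms1, terms2)
  | some (c1, c2) =>
    match h1 : PySem.List.remove? terms1 c1, PySem.List.remove? terms2 c2 with
    | some r1, some r2 => pvLoopA r1 r2 (common ++ [c1])
    | some _, none => (common, terms1, terms2)
    | none, _ => (common, terms1, terms2)
termination_by terms1.length
decreasing_by exact pvRemove_length h1

def compare_terms_no_sign (t1 : List (List Int)) (t2 : List (List Int)) :
    List (List Int) × List (List Int) × List (List Int) :=
  pvLoopA t1 t2 []

-- ===== PORT B =====
-- key = sorted(term[1:])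
def pvKey (u : List Int) : List Int :=
  PySem.List.sorted (PySem.List.slice u (some 1) none) (fun x => x) false

-- 'for idx in range(len(rest)): if rest[idx][0] == key: del rest[idx]; break'
def pvDelFirst (key : List Int) : List (List Int × List Int) → Option (List (List Int × List Int))
  | [] => none
  | p :: rest => if p.1 == key then some rest else (pvDelFirst key rest).map (p :: ·)

-- the single forward pass over t1, accumulating common / left1 by append
def pvLoopB (ts : List (List Int)) (rest : List (List Int × List Int))
    (common left1 : List (List Int)) :
    List (List Int) × List (List Int) × List (List Int) :=
  match ts with
  | [] => (common, left1, rest.map (·.2))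
  | t :: ts' =>
    match pvDelFirst (pvKey t) rest with
    | some rest' => pvLoopB ts' rest' (common ++ [t]) left1
    | none => pvLoopB ts' rest common (left1 ++ [t])

def compare_terms_no_sign_alt (t1 : List (List Int)) (t2 : List (List Int)) :
    List (List Int) × List (List Int) × List (List Int) :=
  pvLoopB t1 (t2.map (fun u => (pvKey u, u))) [] []

-- ===== PRECONDITION & SPEC =====
def Spec_compare_terms_no_sign (t1 : List (List Int)) (t2 : List (List Int)) (out : List (List Int) × List (List Int) × List (List Int)) : Prop := out = compare_terms_no_sign_alt t1 t2
instance (t1 : List (List Int)) (t2 : List (List Int)) (out : List (List Int) × List (List Int) × List (List Int)) : Decidable (Spec_compare_terms_no_sign t1 t2 out) := by unfold Spec_compare_terms_no_sign; infer_instance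

-- ===== CLAIM (what is proved, stated in full; the proofs are below) =====
def Claim_equal_compare_terms_no_sign : Prop := ∀ (t1 : List (List Int)) (t2 : List (List Int)), Dom_compare_terms_no_sign t1 t2 → Spec_compare_terms_no_sign t1 t2 (compare_terms_no_sign t1 t2)

-- ===== LEMMAS AND PROOFS =====

-- Counter(l1) == Counter(l2) is exactly sorted(l1) == sorted(l2)
theorem lists_are_equal_eq (a b : List Int) :
    lists_are_equal a b =
      (PySem.List.sorted a (fun x => x) false == PySem.List.sorted b (fun x => x) false) := by
  rw [Bool.eq_iff_iff]
  rw [beq_iff_eq, PySem.List.sorted_id_eq_sorted_id_iff_perm]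
  unfold lists_are_equal
  simp only [Bool.and_eq_true, List.all_eq_true, beq_iff_eq,
    PySem.Dict.keys_counter, PySem.Dict.getD_counter, PySem.Set.equal_iff,
    PySem.Set.mem_ofList]
  constructor
  · rintro ⟨hset, hcnt⟩
    rw [List.perm_iff_count]
    intro x
    by_cases hx : x ∈ a
    · exact_mod_cast hcnt x hx
    · have hxb : x ∉ b := fun hb => hx ((hset x).mpr hb)
      simp [List.count_eq_zero.mpr hx, List.count_eq_zero.mpr hxb]
  · intro hperm
    constructor
    · intro x; exact ⟨hperm.mem_iff.mp, hperm.mem_iff.mpr⟩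
    · intro x _; exact_mod_cast hperm.count_eq x

theorem pvFindT2_eq_none (t : List Int) (l : List (List Int)) :
    pvFindT2 t l = none ↔
      ∀ u ∈ l, lists_are_equal (PySem.List.slice t (some 1) none)
        (PySem.List.slice u (some 1) none) = false := by
  induction l with
  | nil => simp [pvFindT2]
  | cons u rest ih =>
    by_cases h : lists_are_equal (PySem.List.slice t (some 1) none)
        (PySem.List.slice u (some 1) none) = true
    · simp [pvFindT2, h]
    · simp only [Bool.not_eq_true] at h
      simp [pvFindT2, h, ih]

theorem pvFindT2_eq_some (t : List Int) (l : List (List Int)) (u : List Int)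
    (h : pvFindT2 t l = some u) :
    u ∈ l ∧ lists_are_equal (PySem.List.slice t (some 1) none)
      (PySem.List.slice u (some 1) none) = true := by
  induction l with
  | nil => simp [pvFindT2] at h
  | cons v rest ih =>
    by_cases hv : lists_are_equal (PySem.List.slice t (some 1) none)
        (PySem.List.slice v (some 1) none) = true
    · simp only [pvFindT2, hv, if_true, Option.some.injEq] at h
      subst h; exact ⟨List.mem_cons_self, hv⟩
    · simp only [Bool.not_eq_true] at hv
      simp only [pvFindT2, hv, Bool.false_eq_true, if_false] at h
      obtain ⟨hm, hq⟩ := ih h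
      exact ⟨List.mem_cons_of_mem _ hm, hq⟩

theorem pvFindPair_eq_some (ts t2 : List (List Int)) (c1 c2 : List Int)
    (h : pvFindPair ts t2 = some (c1, c2)) :
    c1 ∈ ts ∧ pvFindT2 c1 t2 = some c2 := by
  induction ts with
  | nil => simp [pvFindPair] at h
  | cons t rest ih =>
    cases hf : pvFindT2 t t2 with
    | some u =>
      simp only [pvFindPair, hf, Option.some.injEq, Prod.mk.injEq] at h
      obtain ⟨h1, h2⟩ := h; subst h1; subst h2
      exact ⟨List.mem_cons_self, hf⟩
    | none =>
      simp only [pvFindPair, hf] at h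
      obtain ⟨hm, hq⟩ := ih h
      exact ⟨List.mem_cons_of_mem _ hm, hq⟩

-- one unfolding of A's while loop, in its two shapes
theorem pvLoopA_none (terms1 terms2 common : List (List Int))
    (hf : pvFindPair terms1 terms2 = none) :
    pvLoopA terms1 terms2 common = (common, terms1, terms2) := by
  rw [pvLoopA]
  simp [hf]

theorem pvLoopA_step (terms1 terms2 common : List (List Int)) {c1 c2 : List Int}
    {r1 r2 : List (List Int)}
    (hf : pvFindPair terms1 terms2 = some (c1, c2))
    (h1 : PySem.List.remove? terms1 c1 = some r1)
    (h2 : PySem.List.remove? terms2 c2 = some r2) :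
    pvLoopA terms1 terms2 common = pvLoopA r1 r2 (common ++ [c1]) := by
  rw [pvLoopA]
  simp only [hf]
  split <;> simp_all

-- the Boolean tests of the two programs agree
theorem pvMatch_eq_key (t v : List Int) :
    lists_are_equal (PySem.List.slice t (some 1) none) (PySem.List.slice v (some 1) none) =
      (pvKey v == pvKey t) := by
  rw [lists_are_equal_eq]
  unfold pvKey
  rw [Bool.eq_iff_iff]
  simp only [beq_iff_eq]
  exact eq_comm

-- one step of pvDelFirst, related to A's search-and-remove on the projected list
theorem pvDelFirst_spec (t : List Int) (kus : List (List Int × List Int))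
    (hk : ∀ p ∈ kus, p.1 = pvKey p.2) :
    (pvDelFirst (pvKey t) kus = none ∧ pvFindT2 t (kus.map (·.2)) = none) ∨
    (∃ pre p post, kus = pre ++ p :: post ∧
      pvDelFirst (pvKey t) kus = some (pre ++ post) ∧
      pvFindT2 t (kus.map (·.2)) = some p.2 ∧
      PySem.List.remove? (kus.map (·.2)) p.2 = some ((pre ++ post).map (·.2))) := by
  induction kus with
  | nil => left; exact ⟨rfl, rfl⟩
  | cons p rest ih =>
    have hp1 : p.1 = pvKey p.2 := hk p List.mem_cons_self
    have hmatch : lists_are_equal (PySem.List.slice t (some 1) none)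
        (PySem.List.slice p.2 (some 1) none) = (p.1 == pvKey t) := by
      rw [pvMatch_eq_key, hp1]
    by_cases hb : p.1 = pvKey t
    · have hbeq : (p.1 == pvKey t) = true := beq_iff_eq.mpr hb
      right
      refine ⟨[], p, rest, rfl, ?_, ?_, ?_⟩
      · simp only [pvDelFirst, hbeq, if_true, List.nil_append]
      · simp only [List.map_cons, pvFindT2, hmatch, hbeq, if_true]
      · simp
    · have hbne : (p.1 == pvKey t) = false := beq_eq_false_iff_ne.mpr hb
      have hrest := ih (fun q hq => hk q (List.mem_cons_of_mem _ hq))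
      rcases hrest with ⟨hd, hf⟩ | ⟨pre, q, post, hsplit, hd, hf, hr⟩
      · left
        constructor
        · simp only [pvDelFirst, hbne, Bool.false_eq_true, if_false, hd, Option.map_none]
        · simp only [List.map_cons, pvFindT2, hmatch, hbne, Bool.false_eq_true, if_false]
          exact hf
      · right
        refine ⟨p :: pre, q, post, by simp [hsplit], ?_, ?_, ?_⟩
        · simp only [pvDelFirst, hbne, Bool.false_eq_true, if_false, hd, Option.map_some,
            List.cons_append]
        · simp only [List.map_cons, pvFindT2, hmatch, hbne, Bool.false_eq_true, if_false]
          exact hf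
        · have hq2 : lists_are_equal (PySem.List.slice t (some 1) none)
              (PySem.List.slice q.2 (some 1) none) = true := (pvFindT2_eq_some _ _ _ hf).2
          have hkey_q : pvKey q.2 = pvKey t := by
            rw [pvMatch_eq_key, beq_iff_eq] at hq2; exact hq2
          have hne : p.2 ≠ q.2 := by
            intro he
            apply hb
            rw [hp1, he, hkey_q]
          rw [List.map_cons, PySem.List.remove?_cons_of_ne _ hne, hr]
          simp

-- A's loop skips a head term that matches nothing in terms2
theorem pvLoopA_skip (t : List Int) (ts t2 common : List (List Int))
    (h : pvFindT2 t t2 = none) :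
    pvLoopA (t :: ts) t2 common =
      ((pvLoopA ts t2 common).1, t :: (pvLoopA ts t2 common).2.1,
        (pvLoopA ts t2 common).2.2) := by
  induction hn : ts.length using Nat.strong_induction_on generalizing ts t2 common with
  | _ n ih =>
  cases hfp : pvFindPair ts t2 with
  | none =>
    have hfp' : pvFindPair (t :: ts) t2 = none := by simp [pvFindPair, h, hfp]
    rw [pvLoopA_none _ _ _ hfp', pvLoopA_none _ _ _ hfp]
  | some pr =>
    obtain ⟨c1, c2⟩ := pr
    obtain ⟨hc1mem, hfind⟩ := pvFindPair_eq_some ts t2 c1 c2 hfp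
    obtain ⟨hc2mem, _⟩ := pvFindT2_eq_some c1 t2 c2 hfind
    have htc1 : t ≠ c1 := by
      intro he; rw [← he, h] at hfind; simp at hfind
    have hrem1 : PySem.List.remove? ts c1 = some (ts.erase c1) :=
      PySem.List.remove?_eq_some_erase ts c1 hc1mem
    have hrem1' : PySem.List.remove? (t :: ts) c1 = some (t :: ts.erase c1) := by
      rw [PySem.List.remove?_cons_of_ne _ htc1, hrem1]; rfl
    have hrem2 : PySem.List.remove? t2 c2 = some (t2.erase c2) :=
      PySem.List.remove?_eq_some_erase t2 c2 hc2mem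
    have hfp' : pvFindPair (t :: ts) t2 = some (c1, c2) := by
      simp [pvFindPair, h, hfp]
    have hstill : pvFindT2 t (t2.erase c2) = none := by
      rw [pvFindT2_eq_none] at h ⊢
      intro u hu
      exact h u (List.mem_of_mem_erase hu)
    have hlen : (ts.erase c1).length < n := by
      have h3 := List.length_erase_of_mem hc1mem
      have h4 := List.length_pos_of_mem hc1mem
      omega
    rw [pvLoopA_step _ _ _ hfp' hrem1' hrem2, pvLoopA_step _ _ _ hfp hrem1 hrem2]
    exact ih (ts.erase c1).length hlen (ts.erase c1) (t2.erase c2) (common ++ [c1]) hstill rfl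

-- the main correspondence: B's single pass computes A's fixpoint loop
theorem pvLoop_agree (ts : List (List Int)) :
    ∀ (kus : List (List Int × List Int)) (common left1 : List (List Int)),
    (∀ p ∈ kus, p.1 = pvKey p.2) →
    pvLoopB ts kus common left1 =
      ((pvLoopA ts (kus.map (·.2)) common).1,
        left1 ++ (pvLoopA ts (kus.map (·.2)) common).2.1,
        (pvLoopA ts (kus.map (·.2)) common).2.2) := by
  induction ts with
  | nil =>
    intro kus common left1 _
    rw [pvLoopB, pvLoopA_none _ _ _ rfl]
    simp
  | cons t ts ih =>
    intro kus common left1 hk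
    rcases pvDelFirst_spec t kus hk with ⟨hd, hf⟩ | ⟨pre, p, post, hsplit, hd, hf, hr⟩
    · rw [pvLoopB]
      simp only [hd]
      rw [ih kus common (left1 ++ [t]) hk]
      rw [pvLoopA_skip t ts (kus.map (·.2)) common hf]
      simp
    · have hk' : ∀ q ∈ pre ++ post, q.1 = pvKey q.2 := by
        intro q hq
        apply hk
        rw [hsplit]
        rcases List.mem_append.mp hq with hx | hx
        · exact List.mem_append.mpr (Or.inl hx)
        · exact List.mem_append.mpr (Or.inr (List.mem_cons_of_mem _ hx))
      rw [pvLoopB]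
      simp only [hd]
      rw [ih (pre ++ post) (common ++ [t]) left1 hk']
      have hfp : pvFindPair (t :: ts) (kus.map (·.2)) = some (t, p.2) := by
        simp [pvFindPair, hf]
      rw [pvLoopA_step _ _ _ hfp (PySem.List.remove?_cons_self t ts) hr]

-- ===== VERDICT (by name: the statement is the Claim_ definition above) =====
theorem compare_terms_no_sign_spec : Claim_equal_compare_terms_no_sign := by
  intro t1 t2 _
  show compare_terms_no_sign t1 t2 = compare_terms_no_sign_alt t1 t2
  unfold compare_terms_no_sign compare_terms_no_sign_alt
  rw [pvLoop_agree t1 (t2.map (fun u => (pvKey u, u))) [] []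
    (by intro p hp; simp only [List.mem_map] at hp; obtain ⟨u, _, rfl⟩ := hp; rfl)]
  rw [show List.map (fun x : List Int × List Int => x.2)
      (List.map (fun u => (pvKey u, u)) t2) = t2 by
    simp [Function.comp_def]]
  simp
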